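-- pv_equiv track=rewrite | github.com/benecristian/Python-implementation-for-SAT-solvers | resolution.py | resolution_solver
-- ===== SOURCE A (Python) =====
-- def resolve(clause1, clause2):
--     resolvents = []
--     for lit in clause1:
--         if -lit in clause2:
--             new_clause = set(clause1 + clause2)
--             new_clause.discard(lit)
--             new_clause.discard(-lit)
--             resolvents.append(list(new_clause))
--     return resolvents
--
-- def resolution_solver(cnf):
--     clauses = [set(clause) for clause in cnf]
--     new = set()
--     while True:
--         pairs = [(clauses[i], clauses[j]) for i in range(len(clauses)) for j in range(i+1, len(clauses))]
--         for (ci, cj) in pairs: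
--             resolvents = resolve(list(ci), list(cj))
--             for res in resolvents:
--                 if not res:
--                     return False  # empty clause found => UNSAT
--                 new_clause = frozenset(res)
--                 if new_clause not in new:
--                     new.add(new_clause)
--         if new.issubset(set(map(frozenset, clauses))):
--             return True  # no new clauses => SAT
--         for c in new:
--             if c not in map(frozenset, clauses):
--                 clauses.append(set(c))
-- ===== SOURCE B (Python) =====
-- def resolution_solver(cnf):
--     # Incremental resolution: each round resolves only pairs whose second clause
--     # is new (added last round), with a hash set for clause membership, instead
--     # of re-resolving every pair of clauses and rescanning the clause list.
--     clauses = [frozenset(clause) for clause in cnf]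
--     known = set(clauses)
--     start = 0  # clauses[start:] are the clauses appended in the previous round
--     while True:
--         n = len(clauses)
--         derived = []        # this round's distinct resolvents, first-occurrence order
--         derived_set = set()
--         for i in range(n):
--             ci = clauses[i]
--             for j in range(max(i + 1, start), n):
--                 cj = clauses[j]
--                 for lit in ci:
--                     if -lit in cj:
--                         res = (ci | cj) - {lit, -lit}
--                         if not res:
--                             return False  # empty clause found => UNSAT
--                         if res not in derived_set:
--                             derived_set.add(res)
--                             derived.append(res)
--         fresh = [c for c in derived if c not in known]
--         if not fresh:
--             return True  # no new clauses => SAT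
--         start = n
--         clauses.extend(fresh)
--         known.update(fresh)
-- ===== Notes on version B (the rewrite author's own statement) =====
-- stated objective: alternative
-- what changed: Instead of rebuilding and re-resolving the full all-pairs list of clauses every saturation round and rescanning the clause list for membership, B resolves each round only the pairs whose second clause was derived in the previous round and keeps a hash set of known clauses, so every pair of clauses is resolved exactly once.
import Mathlib
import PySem

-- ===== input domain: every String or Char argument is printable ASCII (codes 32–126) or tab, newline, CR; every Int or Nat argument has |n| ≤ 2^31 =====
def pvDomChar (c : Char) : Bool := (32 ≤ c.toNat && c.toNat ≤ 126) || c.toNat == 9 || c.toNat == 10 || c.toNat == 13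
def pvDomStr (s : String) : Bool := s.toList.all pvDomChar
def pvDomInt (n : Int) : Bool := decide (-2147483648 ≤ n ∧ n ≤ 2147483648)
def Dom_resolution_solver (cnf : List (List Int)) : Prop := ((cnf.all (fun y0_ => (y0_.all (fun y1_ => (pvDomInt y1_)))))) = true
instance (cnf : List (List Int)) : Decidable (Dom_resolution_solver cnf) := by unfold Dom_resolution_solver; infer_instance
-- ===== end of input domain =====

-- B changes A's saturation loop to an incremental one: each round resolves only pairs whose
-- second clause is newly derived, with a set index for membership, so each pair is resolved
-- once instead of once per round (same worst case; equality of results is what is proved here).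
-- Both ports model a Python set/frozenset of ints by its canonical value: the strictly sorted
-- list of its elements (pvFrozen); a structurally-unreachable fuel counter (2^#literals + 2
-- bounds the number of rounds) makes the 'while True' saturation loops total.

-- pvFrozen xs = the canonical (sorted, duplicate-free) list holding the elements of xs:
-- the model of the Python frozenset value built from xs.
def pvFrozen (xs : List Int) : List Int :=
  PySem.List.sorted (PySem.Set.ofList xs) (fun x => x)

-- ===== PORT A =====
def resolveA (clause1 clause2 : List Int) : List (List Int) :=
  clause1.foldl (fun resolvents lit =>
    if clause2.contains (-lit) then
      resolvents ++ [PySem.Set.discard (PySem.Set.discard (PySem.Set.ofList (clause1 ++ clause2)) lit) (-lit)]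
    else resolvents) []

-- 'for res in resolvents: if not res: return False; …; new.add(frozenset(res))' (none = 'return False')
def procA : List (List Int) → List (List Int) → Option (List (List Int))
  | [], new => some new
  | r :: rs, new => if r = [] then none else procA rs (PySem.Set.add new (pvFrozen r))

-- 'for (ci, cj) in pairs: …'
def pairsProcA : List (List Int × List Int) → List (List Int) → Option (List (List Int))
  | [], new => some new
  | (ci, cj) :: ps, new =>
    match procA (resolveA ci cj) new with
    | none => none
    | some new' => pairsProcA ps new'

-- the 'while True' loop; fuel only makes it total (2^#literals + 2 bounds the rounds, see solver)
def loopA : Nat → List (List Int) → List (List Int) → Bool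
  | 0, _, _ => true
  | fuel+1, clauses, new =>
    let pairs := (PySem.List.pyRange 0 (PySem.List.len clauses)).flatMap (fun i =>
      (PySem.List.pyRange (i+1) (PySem.List.len clauses)).map (fun j =>
        (PySem.List.pyGetD clauses i [], PySem.List.pyGetD clauses j [])))
    match pairsProcA pairs new with
    | none => false
    | some new' =>
      if PySem.Set.issubset new' (PySem.Set.ofList (clauses.map pvFrozen)) then true
      else loopA fuel
        (new'.foldl (fun cl c => if (cl.map pvFrozen).contains c then cl else cl ++ [c]) clauses)
        new'

def resolution_solver (cnf : List (List Int)) : Bool :=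
  loopA (2 ^ (PySem.Set.ofList cnf.flatten).length + 2)
    (cnf.map (fun clause => pvFrozen clause)) []

-- ===== PORT B =====
-- 'for lit in ci: if -lit in cj: res = (ci | cj) - {lit, -lit}; …' (none = 'return False';
-- derived is a PySem.Set: Source B's derived list + derived_set pair in one ordered set)
def litLoopB (ci cj : List Int) : List Int → List (List Int) → Option (List (List Int))
  | [], derived => some derived
  | lit :: lits, derived =>
    if cj.contains (-lit) then
      let res := pvFrozen (PySem.Set.diff (PySem.Set.union ci cj) [lit, -lit])
      if res = [] then none
      else litLoopB ci cj lits (PySem.Set.add derived res)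
    else litLoopB ci cj lits derived

-- 'for j in range(max(i + 1, start), n): …'
def jLoopB (clauses : List (List Int)) (ci : List Int) : List Int → List (List Int) → Option (List (List Int))
  | [], derived => some derived
  | j :: js, derived =>
    match litLoopB ci (PySem.List.pyGetD clauses j []) ci derived with
    | none => none
    | some d => jLoopB clauses ci js d

-- 'for i in range(n): …'
def iLoopB (clauses : List (List Int)) (start n : Int) : List Int → List (List Int) → Option (List (List Int))
  | [], derived => some derived
  | i :: is_, derived =>
    let ci := PySem.List.pyGetD clauses i []
    match jLoopB clauses ci (PySem.List.pyRange (max (i+1) start) n) derived with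
    | none => none
    | some d => iLoopB clauses start n is_ d

-- the 'while True' loop of Source B; same totalizing fuel as port A
def loopB : Nat → List (List Int) → List (List Int) → Int → Bool
  | 0, _, _, _ => true
  | fuel+1, clauses, known, start =>
    let n := PySem.List.len clauses
    match iLoopB clauses start n (PySem.List.pyRange 0 n) PySem.Set.empty with
    | none => false
    | some derived =>
      let fresh := derived.filter (fun c => !(PySem.Set.contains known c))
      if fresh = [] then true
      else loopB fuel (clauses ++ fresh) (PySem.Set.update known fresh) n

def resolution_solver_alt (cnf : List (List Int)) : Bool :=
  loopB (2 ^ (PySem.Set.ofList cnf.flatten).length + 2)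
    (cnf.map (fun clause => pvFrozen clause))
    (PySem.Set.ofList (cnf.map (fun clause => pvFrozen clause))) 0

-- ===== PRECONDITION & SPEC =====
def Spec_resolution_solver (cnf : List (List Int)) (out : Bool) : Prop := out = resolution_solver_alt cnf
instance (cnf : List (List Int)) (out : Bool) : Decidable (Spec_resolution_solver cnf out) := by unfold Spec_resolution_solver; infer_instance

-- ===== CLAIM (what is proved, stated in full; the proofs are below) =====
def Claim_equal_resolution_solver : Prop := ∀ (cnf : List (List Int)), Dom_resolution_solver cnf → Spec_resolution_solver cnf (resolution_solver cnf)

-- ===== LEMMAS AND PROOFS =====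

-- the raw resolvent set A builds for a resolvable literal
def rawRes (c1 c2 : List Int) (lit : Int) : List Int :=
  PySem.Set.discard (PySem.Set.discard (PySem.Set.ofList (c1 ++ c2)) lit) (-lit)

lemma mem_pvFrozen (xs : List Int) (x : Int) : x ∈ pvFrozen xs ↔ x ∈ xs := by
  simp [pvFrozen, PySem.List.mem_sorted, PySem.Set.mem_ofList]

lemma pvFrozen_pairwise (xs : List Int) : (pvFrozen xs).Pairwise (· < ·) :=
  PySem.List.sorted_ofList_pairwise_lt xs

lemma nodup_pvFrozen (xs : List Int) : (pvFrozen xs).Nodup :=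
  (pvFrozen_pairwise xs).nodup

lemma pvFrozen_ext {xs ys : List Int} (h : ∀ x, x ∈ xs ↔ x ∈ ys) : pvFrozen xs = pvFrozen ys :=
  PySem.List.sorted_eq_of_perm_of_pairwise_lt (PySem.Set.ofList xs) (pvFrozen ys) (fun x => x)
    ((List.perm_ext_iff_of_nodup (nodup_pvFrozen ys) (PySem.Set.nodup_ofList xs)).2
      (fun a => by rw [mem_pvFrozen, PySem.Set.mem_ofList, h]))
    (pvFrozen_pairwise ys)

lemma pvFrozen_idem (xs : List Int) : pvFrozen (pvFrozen xs) = pvFrozen xs :=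
  PySem.List.sorted_eq_of_perm_of_pairwise_lt (PySem.Set.ofList (pvFrozen xs)) (pvFrozen xs) (fun x => x)
    (by rw [PySem.Set.ofList_eq_self_of_nodup _ (nodup_pvFrozen xs)])
    (pvFrozen_pairwise xs)

lemma pvFrozen_eq_nil_iff {xs : List Int} : pvFrozen xs = [] ↔ xs = [] := by
  constructor
  · intro h
    rw [List.eq_nil_iff_forall_not_mem]
    intro x hx
    have := (mem_pvFrozen xs x).2 hx
    simp [h] at this
  · intro h; subst h; rfl

-- B's per-literal resolvent value is the canonical form of A's raw resolvent
lemma resB_eq_pvFrozen_rawRes (c1 c2 : List Int) (lit : Int) :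
    pvFrozen (PySem.Set.diff (PySem.Set.union c1 c2) [lit, -lit]) = pvFrozen (rawRes c1 c2 lit) := by
  apply pvFrozen_ext
  intro x
  simp [rawRes, PySem.Set.mem_diff, PySem.Set.mem_union, PySem.Set.mem_discard, PySem.Set.mem_ofList]
  tauto

lemma resolveA_eq (c1 c2 : List Int) :
    resolveA c1 c2 = (c1.filter (fun lit => c2.contains (-lit))).map (rawRes c1 c2) := by
  unfold resolveA
  rw [PySem.List.foldl_append_if (fun lit => c2.contains (-lit))
    (fun lit => PySem.Set.discard (PySem.Set.discard (PySem.Set.ofList (c1 ++ c2)) lit) (-lit))]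
  simp [rawRes]

lemma procA_append (xs ys : List (List Int)) (d : List (List Int)) :
    procA (xs ++ ys) d = (procA xs d).bind (fun d' => procA ys d') := by
  induction xs generalizing d with
  | nil => simp [procA]
  | cons r rs ih =>
    by_cases h : r = [] <;> simp [procA, h, ih]

lemma procA_none_iff (rs : List (List Int)) (d : List (List Int)) :
    procA rs d = none ↔ [] ∈ rs := by
  induction rs generalizing d with
  | nil => simp [procA]
  | cons r t ih =>
    by_cases h : r = []
    · subst h; simp [procA]
    · simp [procA, h, ih, Ne.symm h]

lemma procA_eq_some (rs : List (List Int)) (d : List (List Int)) (h : [] ∉ rs) :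
    procA rs d = some (rs.foldl (fun s r => PySem.Set.add s (pvFrozen r)) d) := by
  induction rs generalizing d with
  | nil => simp [procA]
  | cons r t ih =>
    simp only [List.mem_cons, not_or] at h
    simp [procA, Ne.symm h.1, ih _ h.2]

lemma pairsProcA_eq (ps : List (List Int × List Int)) (d : List (List Int)) :
    pairsProcA ps d = procA (ps.flatMap (fun p => resolveA p.1 p.2)) d := by
  induction ps generalizing d with
  | nil => simp [pairsProcA, procA]
  | cons p t ih =>
    obtain ⟨ci, cj⟩ := p
    simp only [List.flatMap_cons, procA_append, pairsProcA]
    cases h : procA (resolveA ci cj) d with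
    | none => simp
    | some d' => simp [ih]

lemma litLoopB_eq (ci cj : List Int) (lits : List Int) (d : List (List Int)) :
    litLoopB ci cj lits d = procA ((lits.filter (fun l => cj.contains (-l))).map (rawRes ci cj)) d := by
  induction lits generalizing d with
  | nil => simp [litLoopB, procA]
  | cons lit t ih =>
    by_cases h : cj.contains (-lit) = true
    · rw [List.filter_cons, if_pos h, List.map_cons]
      simp only [litLoopB, h, if_true, procA, resB_eq_pvFrozen_rawRes, pvFrozen_eq_nil_iff]
      by_cases hr : rawRes ci cj lit = []
      · rw [if_pos hr, if_pos hr]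
      · rw [if_neg hr, if_neg hr, ih]
    · rw [List.filter_cons, if_neg h]
      simp only [litLoopB]
      rw [if_neg h]
      exact ih d

lemma jLoopB_eq (cl : List (List Int)) (ci : List Int) (js : List Int) (d : List (List Int)) :
    jLoopB cl ci js d = procA (js.flatMap (fun j => resolveA ci (PySem.List.pyGetD cl j []))) d := by
  induction js generalizing d with
  | nil => simp [jLoopB, procA]
  | cons j t ih =>
    simp only [jLoopB, List.flatMap_cons, procA_append]
    rw [litLoopB_eq, ← resolveA_eq]
    cases h : procA (resolveA ci (PySem.List.pyGetD cl j [])) d with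
    | none => simp
    | some d' => simp [ih]

lemma iLoopB_eq (cl : List (List Int)) (start n : Int) (is_ : List Int) (d : List (List Int)) :
    iLoopB cl start n is_ d =
      procA (is_.flatMap (fun i => (PySem.List.pyRange (max (i+1) start) n).flatMap
        (fun j => resolveA (PySem.List.pyGetD cl i []) (PySem.List.pyGetD cl j [])))) d := by
  induction is_ generalizing d with
  | nil => simp [iLoopB, procA]
  | cons i t ih =>
    simp only [iLoopB, List.flatMap_cons, procA_append]
    rw [jLoopB_eq]
    cases h : procA _ d with
    | none => simp
    | some d' => simp [ih]

lemma filter_add {α : Type} [BEq α] [LawfulBEq α] (s : PySem.Set α) (x : α) (p : α → Bool) :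
    (PySem.Set.add s x).filter p = if p x then PySem.Set.add (s.filter p) x else s.filter p := by
  rw [PySem.Set.add_eq_ite]
  by_cases hm : x ∈ s
  · rw [if_pos hm]
    by_cases hp : p x = true
    · rw [if_pos hp, PySem.Set.add_eq_ite, if_pos (List.mem_filter.2 ⟨hm, hp⟩)]
    · rw [if_neg hp]
  · rw [if_neg hm, List.filter_append, List.filter_cons]
    by_cases hp : p x = true
    · rw [if_pos hp, if_pos hp, List.filter_nil, PySem.Set.add_eq_ite,
        if_neg (fun hc => hm (List.mem_filter.1 hc).1)]
    · rw [if_neg hp, if_neg hp, List.filter_nil, List.append_nil]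

lemma filter_foldl_add {α β : Type} [BEq α] [LawfulBEq α] (f : β → α) (l : List β)
    (s : PySem.Set α) (p : α → Bool) :
    (l.foldl (fun s b => PySem.Set.add s (f b)) s).filter p
      = (l.filter (fun b => p (f b))).foldl (fun s b => PySem.Set.add s (f b)) (s.filter p) := by
  induction l generalizing s with
  | nil => rfl
  | cons b t ih =>
    rw [List.foldl_cons, ih, filter_add, List.filter_cons]
    by_cases hp : p (f b) = true
    · rw [if_pos hp, if_pos hp, List.foldl_cons]
    · rw [if_neg hp, if_neg hp]

lemma nodup_foldl_add {α β : Type} [BEq α] [LawfulBEq α] (f : β → α) (l : List β)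
    (s : PySem.Set α) (h : s.Nodup) :
    (l.foldl (fun s b => PySem.Set.add s (f b)) s).Nodup := by
  induction l generalizing s with
  | nil => exact h
  | cons b t ih => exact ih _ (PySem.Set.nodup_add s (f b) h)

lemma foldl_add_nil_iff {α β : Type} [BEq α] [LawfulBEq α] (f : β → α) (l : List β) :
    l.foldl (fun s b => PySem.Set.add s (f b)) [] = [] ↔ l = [] := by
  cases l with
  | nil => simp
  | cons b t =>
    simp only [List.cons_ne_nil, iff_false]
    exact List.ne_nil_of_mem
      ((PySem.Set.mem_foldl_add (b :: t) f [] (f b)).2 (Or.inr ⟨b, List.mem_cons_self, rfl⟩))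

lemma contains_ofList_eq {α : Type} [BEq α] [LawfulBEq α] (l : List α) (x : α) :
    (PySem.Set.ofList l).contains x = l.contains x := by
  by_cases hx : x ∈ l
  · rw [(PySem.Set.contains_iff _ _).2 ((PySem.Set.mem_ofList l x).2 hx), List.contains_iff_mem.2 hx]
  · rw [Bool.eq_false_iff.2 (fun h => hx ((PySem.Set.mem_ofList l x).1 ((PySem.Set.contains_iff _ _).1 h))),
      Bool.eq_false_iff.2 (fun h => hx (List.contains_iff_mem.1 h))]

lemma foldAppend (new' : List (List Int)) : ∀ (cl : List (List Int)), new'.Nodup →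
    (∀ c ∈ cl, pvFrozen c = c) → (∀ c ∈ new', pvFrozen c = c) →
    new'.foldl (fun l c => if (l.map pvFrozen).contains c then l else l ++ [c]) cl
      = cl ++ new'.filter (fun c => !(cl.contains c)) := by
  induction new' with
  | nil => intro cl _ _ _; simp
  | cons c t ih =>
    intro cl hnd hccl hcn
    have hmap : cl.map pvFrozen = cl := by
      have := List.map_congr_left (l := cl) (f := pvFrozen) (g := id) (fun a ha => hccl a ha)
      simpa using this
    rw [List.foldl_cons, List.filter_cons, hmap]
    by_cases hm : c ∈ cl
    · rw [if_pos (List.contains_iff_mem.2 hm), ih cl hnd.of_cons hccl (fun x hx => hcn x (List.mem_cons_of_mem c hx)),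
        if_neg (by simp [hm])]
    · rw [if_neg (by simpa using hm),
        ih (cl ++ [c]) hnd.of_cons
          (by intro x hx
              rcases List.mem_append.1 hx with h' | h'
              · exact hccl x h'
              · simp only [List.mem_singleton] at h'; rw [h']
                exact hcn c List.mem_cons_self)
          (fun x hx => hcn x (List.mem_cons_of_mem c hx)),
        if_pos (by simpa using hm), List.append_assoc, List.singleton_append]
      congr 1
      congr 1
      apply List.filter_congr
      intro x hx
      have hxc : x ≠ c := fun h => (List.nodup_cons.1 hnd).1 (h ▸ hx)
      simp [List.contains_eq_mem, hxc]

lemma flatMap_split {ι α : Type} (is_ : List ι) (fA fB fO : ι → List α) (p : α → Bool) (x : α)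
    (h : ∀ i ∈ is_, fA i = fO i ++ fB i)
    (hx : ∀ i ∈ is_, x ∉ fO i)
    (hp : ∀ i ∈ is_, ∀ r ∈ fO i, p r = false) :
    (x ∈ is_.flatMap fA ↔ x ∈ is_.flatMap fB) ∧
      (is_.flatMap fA).filter p = (is_.flatMap fB).filter p := by
  induction is_ with
  | nil => simp
  | cons i t ih =>
    obtain ⟨ihm, ihf⟩ := ih (fun i hi => h i (List.mem_cons_of_mem _ hi))
      (fun i hi => hx i (List.mem_cons_of_mem _ hi)) (fun i hi => hp i (List.mem_cons_of_mem _ hi))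
    constructor
    · simp only [List.flatMap_cons, List.mem_append, h i List.mem_cons_self, ihm]
      constructor
      · rintro ((h' | h') | h')
        · exact absurd h' (hx i List.mem_cons_self)
        · exact Or.inl h'
        · exact Or.inr h'
      · rintro (h' | h')
        · exact Or.inl (Or.inr h')
        · exact Or.inr h'
    · simp only [List.flatMap_cons, List.filter_append, h i List.mem_cons_self, ihf]
      rw [List.filter_eq_nil_iff.2 (by intro a ha; rw [hp i List.mem_cons_self a ha]; simp), List.nil_append]

lemma pyGetD_append_left {α : Type} (xs ys : List α) (i : Int) (d : α)
    (h0 : 0 ≤ i) (h : i < (xs.length : Int)) :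
    PySem.List.pyGetD (xs ++ ys) i d = PySem.List.pyGetD xs i d := by
  obtain ⟨k, rfl⟩ : ∃ k : Nat, i = (k : Int) := ⟨i.toNat, (Int.toNat_of_nonneg h0).symm⟩
  rw [PySem.List.pyGetD_natCast, PySem.List.pyGetD_natCast, List.getD_append]
  exact_mod_cast h

-- the loop invariant relating A's and B's states: every pair of clauses both older than
-- 'start' resolves to nothing new (no empty clause; every resolvent already recorded)
def SatInv (cl : List (List Int)) (start : Int) (new : List (List Int)) : Prop :=
  ∀ i j : Int, 0 ≤ i → i < j → j < start →
    ∀ r ∈ resolveA (PySem.List.pyGetD cl i []) (PySem.List.pyGetD cl j []),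
      r ≠ [] ∧ pvFrozen r ∈ new

lemma loop_eq : ∀ (fuel : Nat) (cl new : List (List Int)) (start : Int),
    0 ≤ start → start ≤ (cl.length : Int) →
    (∀ c ∈ new, c ∈ cl) → new.Nodup → (∀ c ∈ cl, pvFrozen c = c) →
    SatInv cl start new →
    loopA fuel cl new = loopB fuel cl (PySem.Set.ofList cl) start := by
  intro fuel
  induction fuel with
  | zero => intros; rfl
  | succ fuel ih =>
    intro cl new start h0 hsl h1 hnd h2 hsat
    have hmap : cl.map pvFrozen = cl := by
      have := List.map_congr_left (l := cl) (f := pvFrozen) (g := id) (fun a ha => h2 a ha)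
      simpa using this
    simp only [loopA, loopB, PySem.List.len_eq]
    set n : Int := (cl.length : Int) with hn
    set F : Int → Int → List (List Int) :=
      fun i j => resolveA (PySem.List.pyGetD cl i []) (PySem.List.pyGetD cl j []) with hF
    set RA : List (List Int) :=
      (PySem.List.pyRange 0 n).flatMap (fun i => (PySem.List.pyRange (i+1) n).flatMap (F i)) with hRA
    set RB : List (List Int) :=
      (PySem.List.pyRange 0 n).flatMap
        (fun i => (PySem.List.pyRange (max (i+1) start) n).flatMap (F i)) with hRB
    have hpairs : pairsProcA
        ((PySem.List.pyRange 0 n).flatMap (fun i =>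
          (PySem.List.pyRange (i+1) n).map (fun j =>
            (PySem.List.pyGetD cl i [], PySem.List.pyGetD cl j [])))) new = procA RA new := by
      rw [pairsProcA_eq, List.flatMap_assoc]
      refine congrArg (fun rs => procA rs new) ?_
      refine congrArg (fun f => List.flatMap f (PySem.List.pyRange 0 n)) (funext fun i => ?_)
      rw [List.flatMap_map]
    have hiB : iLoopB cl start n (PySem.List.pyRange 0 n) PySem.Set.empty = procA RB PySem.Set.empty :=
      iLoopB_eq cl start n _ _
    -- the old-old chunks are saturated
    have hchunk : ∀ i ∈ PySem.List.pyRange 0 n,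
        (PySem.List.pyRange (i+1) n).flatMap (F i)
          = (PySem.List.pyRange (i+1) (max (i+1) start)).flatMap (F i)
            ++ (PySem.List.pyRange (max (i+1) start) n).flatMap (F i) := by
      intro i hi
      rw [PySem.List.mem_pyRange_one] at hi
      rw [← List.flatMap_append,
        ← PySem.List.pyRange_one_append (i+1) (max (i+1) start) n (le_max_left _ _)
          (max_le (by omega) hsl)]
    have hold : ∀ i ∈ PySem.List.pyRange 0 n,
        ∀ r ∈ (PySem.List.pyRange (i+1) (max (i+1) start)).flatMap (F i),
          r ≠ [] ∧ pvFrozen r ∈ cl := by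
      intro i hi r hr
      rw [PySem.List.mem_pyRange_one] at hi
      rw [List.mem_flatMap] at hr
      obtain ⟨j, hj, hrj⟩ := hr
      rw [PySem.List.mem_pyRange_one] at hj
      have hjs : j < start := by
        rcases lt_max_iff.1 hj.2 with h' | h' <;> omega
      have hres := hsat i j hi.1 (by omega) hjs r hrj
      exact ⟨hres.1, h1 _ hres.2⟩
    obtain ⟨hmemiff, hfilter⟩ := flatMap_split (PySem.List.pyRange 0 n)
      (fun i => (PySem.List.pyRange (i+1) n).flatMap (F i))
      (fun i => (PySem.List.pyRange (max (i+1) start) n).flatMap (F i))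
      (fun i => (PySem.List.pyRange (i+1) (max (i+1) start)).flatMap (F i))
      (fun r => !(cl.contains (pvFrozen r))) [] hchunk
      (fun i hi h' => ((hold i hi [] h').1 rfl))
      (fun i hi r hr => by
        show (!(cl.contains (pvFrozen r))) = false
        rw [List.contains_iff_mem.2 (hold i hi r hr).2]; rfl)
    rw [← hRA, ← hRB] at hmemiff hfilter
    rw [hpairs, hiB]
    cases heqA : procA RA new with
    | none =>
      rw [(procA_none_iff RB PySem.Set.empty).2 (hmemiff.1 ((procA_none_iff RA new).1 heqA))]
    | some new' =>
      have hemp : [] ∉ RA := by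
        intro hc
        rw [(procA_none_iff RA new).2 hc] at heqA
        simp at heqA
      have hempB : [] ∉ RB := fun hc => hemp (hmemiff.2 hc)
      have hnew' : new' = RA.foldl (fun s r => PySem.Set.add s (pvFrozen r)) new := by
        rw [procA_eq_some RA new hemp, Option.some.injEq] at heqA
        exact heqA.symm
      rw [procA_eq_some RB PySem.Set.empty hempB]
      simp only []
      -- both "nothing new" tests are the emptiness of the same filtered list
      have hfreshB : (RB.foldl (fun s r => PySem.Set.add s (pvFrozen r)) PySem.Set.empty).filter
            (fun c => !((PySem.Set.ofList cl).contains c))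
          = (RA.filter (fun r => !(cl.contains (pvFrozen r)))).foldl
              (fun s r => PySem.Set.add s (pvFrozen r)) [] := by
        rw [filter_foldl_add,
          List.filter_congr (l := RB) (p := fun b => !((PySem.Set.ofList cl).contains (pvFrozen b)))
            (q := fun b => !(cl.contains (pvFrozen b))) (fun r _ => by
              show (!((PySem.Set.ofList cl).contains (pvFrozen r))) = !(cl.contains (pvFrozen r))
              rw [contains_ofList_eq]),
          ← hfilter]
        simp only [PySem.Set.empty, List.filter_nil]
      have hfreshA : new'.filter (fun c => !(cl.contains c))
          = (RA.filter (fun r => !(cl.contains (pvFrozen r)))).foldl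
              (fun s r => PySem.Set.add s (pvFrozen r)) [] := by
        rw [hnew', filter_foldl_add,
          List.filter_eq_nil_iff.2 (fun c hc => by
            rw [List.contains_iff_mem.2 (h1 c hc)]; simp)]
      have hmemnew' : ∀ x, x ∈ new' ↔ x ∈ new ∨ ∃ r ∈ RA, x = pvFrozen r := by
        intro x; rw [hnew']; exact PySem.Set.mem_foldl_add RA pvFrozen new x
      have hcond : (PySem.Set.issubset new' (PySem.Set.ofList (cl.map pvFrozen)) = true)
          ↔ RA.filter (fun r => !(cl.contains (pvFrozen r))) = [] := by
        rw [hmap, PySem.Set.issubset_iff]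
        constructor
        · intro hs
          rw [List.filter_eq_nil_iff]
          intro r hr
          have hmem : pvFrozen r ∈ cl := (PySem.Set.mem_ofList _ _).1
            (hs _ ((hmemnew' _).2 (Or.inr ⟨r, hr, rfl⟩)))
          rw [List.contains_iff_mem.2 hmem]
          simp
        · intro hf x hx
          rcases (hmemnew' x).1 hx with hx' | ⟨r, hr, rfl⟩
          · exact (PySem.Set.mem_ofList _ _).2 (h1 x hx')
          · have hb := List.filter_eq_nil_iff.1 hf r hr
            simp only [Bool.not_eq_true', Bool.not_eq_false] at hb
            exact (PySem.Set.mem_ofList _ _).2 (List.contains_iff_mem.1 hb)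
      by_cases hfe : RA.filter (fun r => !(cl.contains (pvFrozen r))) = []
      · rw [if_pos (hcond.2 hfe), if_pos (by rw [hfreshB, hfe, List.foldl_nil])]
      · have hcanon_new' : ∀ c ∈ new', pvFrozen c = c := by
          intro c hc
          rcases (hmemnew' c).1 hc with hc' | ⟨r, _, rfl⟩
          · exact h2 c (h1 c hc')
          · exact pvFrozen_idem r
        have hndnew' : new'.Nodup := by
          rw [hnew']; exact nodup_foldl_add pvFrozen RA new hnd
        rw [if_neg (fun hc => hfe (hcond.1 hc)),
          if_neg (by rw [hfreshB]; exact fun hc => hfe ((foldl_add_nil_iff pvFrozen _).1 hc)),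
          hfreshB, foldAppend new' cl hndnew' h2 hcanon_new', hfreshA, ← PySem.Set.ofList_append]
        -- the recursive states coincide; re-establish the invariant and apply the IH
        set FF : List (List Int) := (RA.filter (fun r => !(cl.contains (pvFrozen r)))).foldl
          (fun s r => PySem.Set.add s (pvFrozen r)) [] with hFF
        have hmemFF : ∀ x, x ∈ FF ↔ ∃ r ∈ RA.filter (fun r => !(cl.contains (pvFrozen r))), x = pvFrozen r := by
          intro x
          rw [hFF, PySem.Set.mem_foldl_add]
          simp
        apply ih (cl ++ FF) new' n (by positivity)
        · rw [List.length_append]; push_cast; omega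
        · intro c hc
          rcases (hmemnew' c).1 hc with hc' | ⟨r, hr, rfl⟩
          · exact List.mem_append_left _ (h1 c hc')
          · by_cases hin : pvFrozen r ∈ cl
            · exact List.mem_append_left _ hin
            · refine List.mem_append_right _ ((hmemFF _).2 ⟨r, List.mem_filter.2 ⟨hr, ?_⟩, rfl⟩)
              simp [hin]
        · exact hndnew'
        · intro c hc
          rcases List.mem_append.1 hc with hc' | hc'
          · exact h2 c hc'
          · obtain ⟨r, _, rfl⟩ := (hmemFF c).1 hc'
            exact pvFrozen_idem r
        · intro i j hi hij hjn r hr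
          rw [pyGetD_append_left cl FF i [] hi (by omega),
            pyGetD_append_left cl FF j [] (by omega) hjn] at hr
          have hrRA : r ∈ RA := by
            rw [hRA, List.mem_flatMap]
            refine ⟨i, PySem.List.mem_pyRange_one.2 ⟨hi, by omega⟩, ?_⟩
            rw [List.mem_flatMap]
            exact ⟨j, PySem.List.mem_pyRange_one.2 ⟨by omega, hjn⟩, hr⟩
          refine ⟨fun hc => hemp (hc ▸ hrRA), ?_⟩
          exact (hmemnew' _).2 (Or.inr ⟨r, hrRA, rfl⟩)

-- ===== VERDICT (by name: the statement is the Claim_ definition above) =====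
theorem resolution_solver_spec : Claim_equal_resolution_solver := by
  intro cnf _
  unfold Spec_resolution_solver resolution_solver resolution_solver_alt
  apply loop_eq _ (cnf.map (fun clause => pvFrozen clause)) [] 0 le_rfl (by positivity)
  · intro c hc; cases hc
  · exact List.nodup_nil
  · intro c hc
    obtain ⟨a, _, rfl⟩ := List.mem_map.1 hc
    exact pvFrozen_idem a
  · intro i j hi hij hj0 r hr
    omega
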